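-- pv_equiv track=rewrite | github.com/anonekama/cyoa-archives | cyoa_archives/scrapers/utils.py | remove_url_substr_from_urls
-- ===== SOURCE A (Python) =====
-- def remove_url_substr_from_urls(urls, substr_list):
--     results = []
--     for url in urls:
--         is_good = True
--         for substr in substr_list:
--             if substr in url:
--                 is_good = False
--         if is_good:
--             results.append(url)
--     return results
-- ===== SOURCE B (Python) =====
-- def remove_url_substr_from_urls(urls, substr_list):
--     # Inverted loops: filter the surviving urls once per blacklisted substring;
--     # a url is removed at its first matching substring and never rescanned.
--     results = list(urls)
--     for substr in substr_list:
--         results = [u for u in results if substr not in u]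
--     return results
-- ===== Notes on version B (the rewrite author's own statement) =====
-- stated objective: alternative
-- what changed: Inverted the loop nesting: instead of testing every substring against every url, B filters the surviving url list once per substring, so a url matched by an early substring is never compared against later ones.
import Mathlib
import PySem

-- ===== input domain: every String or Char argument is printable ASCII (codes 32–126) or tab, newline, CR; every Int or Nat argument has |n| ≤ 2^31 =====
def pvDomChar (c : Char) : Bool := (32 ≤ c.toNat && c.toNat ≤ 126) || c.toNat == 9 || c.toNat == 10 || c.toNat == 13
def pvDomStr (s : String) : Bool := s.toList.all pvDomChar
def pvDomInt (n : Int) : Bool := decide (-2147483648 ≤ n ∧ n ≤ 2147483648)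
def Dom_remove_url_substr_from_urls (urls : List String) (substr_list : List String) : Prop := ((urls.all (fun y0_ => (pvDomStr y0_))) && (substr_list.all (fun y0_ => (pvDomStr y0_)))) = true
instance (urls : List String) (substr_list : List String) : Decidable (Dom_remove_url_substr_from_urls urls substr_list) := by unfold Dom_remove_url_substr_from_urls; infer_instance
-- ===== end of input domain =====

-- B inverts A's loop nesting: it filters the surviving url list once per blacklisted substring
-- instead of testing every substring against every url (objective: alternative; same return value).
-- ===== PORT A =====
-- A: for each url, scan ALL substrings setting is_good := false on a hit, append if still good.
def remove_url_substr_from_urls (urls : List String) (substr_list : List String) : List String :=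
  urls.foldl (fun results url =>
    let is_good := substr_list.foldl (fun g substr => if PySem.Str.isIn substr url then false else g) true
    if is_good then results ++ [url] else results) []

-- ===== PORT B =====
-- B: filter the surviving urls once per substring (inverted loop nesting).
def remove_url_substr_from_urls_alt (urls : List String) (substr_list : List String) : List String :=
  substr_list.foldl (fun results substr => results.filter (fun u => !PySem.Str.isIn substr u)) urls

-- ===== PRECONDITION & SPEC =====
def Spec_remove_url_substr_from_urls (urls : List String) (substr_list : List String) (out : List String) : Prop := out = remove_url_substr_from_urls_alt urls substr_list
instance (urls : List String) (substr_list : List String) (out : List String) : Decidable (Spec_remove_url_substr_from_urls urls substr_list out) := by unfold Spec_remove_url_substr_from_urls; infer_instance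

-- ===== CLAIM (what is proved, stated in full; the proofs are below) =====
def Claim_equal_remove_url_substr_from_urls : Prop := ∀ (urls : List String) (substr_list : List String), Dom_remove_url_substr_from_urls urls substr_list → Spec_remove_url_substr_from_urls urls substr_list (remove_url_substr_from_urls urls substr_list)

-- ===== LEMMAS AND PROOFS =====

-- A's inner loop computes "no substring occurs in url".
theorem pv_inner (url : String) (l : List String) (b : Bool) :
    l.foldl (fun g substr => if PySem.Str.isIn substr url then false else g) b
      = (b && l.all (fun s => !PySem.Str.isIn s url)) := by
  induction l generalizing b with
  | nil => simp
  | cons s rest ih =>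
    rw [List.foldl_cons, ih, List.all_cons]
    by_cases h : PySem.Chars.isIn s.toList url.toList = true <;> simp [h]

-- A equals one filter of urls by "no substring occurs".
theorem pv_a_eq (urls substr_list : List String) :
    remove_url_substr_from_urls urls substr_list
      = urls.filter (fun u => substr_list.all (fun s => !PySem.Str.isIn s u)) := by
  unfold remove_url_substr_from_urls
  simp only [pv_inner, Bool.true_and]
  exact (PySem.List.foldl_append_if_eq_filter _ _ _)

-- B equals the same filter.
theorem pv_b_eq (urls substr_list : List String) :
    remove_url_substr_from_urls_alt urls substr_list
      = urls.filter (fun u => substr_list.all (fun s => !PySem.Str.isIn s u)) := by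
  unfold remove_url_substr_from_urls_alt
  induction substr_list generalizing urls with
  | nil => simp
  | cons s rest ih =>
    simp only [List.foldl_cons, ih, List.filter_filter, List.all_cons]
    exact List.filter_congr (fun u _ => by simp [Bool.and_comm])

-- ===== VERDICT (by name: the statement is the Claim_ definition above) =====
theorem remove_url_substr_from_urls_spec : Claim_equal_remove_url_substr_from_urls := by
  intro urls substr_list _
  unfold Spec_remove_url_substr_from_urls
  rw [pv_a_eq, pv_b_eq]
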